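-- pv_equiv track=rewrite | github.com/rnortman/mouc | src/mouc/styling.py | _tags_match
-- ===== SOURCE A (Python) =====
-- def _tags_match(func_tags: list[str] | None, active_tags: set[str]) -> bool:
--     """Check if a function's tags match the active style tags.
--
--     Supports negated tags with '!' prefix (e.g., '!detailed' matches when
--     'detailed' is NOT active). Multiple negated tags use AND logic (all must
--     be absent). Positive tags use OR logic (at least one must match).
--
--     Args:
--         func_tags: Tags specified on the function (None = always run)
--         active_tags: Currently active style tags
--
--     Returns:
--         True if the function should run, False otherwise
--     """
--     # None means no tag requirement - always run
--     if func_tags is None: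
--         return True
--
--     positive_tags: list[str] = []
--     negated_tags: list[str] = []
--     for tag in func_tags:
--         if tag.startswith("!"):
--             negated_tags.append(tag[1:])
--         else:
--             positive_tags.append(tag)
--
--     # All negated tags must be absent (AND logic)
--     for neg_tag in negated_tags:
--         if neg_tag in active_tags:
--             return False
--
--     # If no positive tags, negations alone are sufficient
--     if not positive_tags:
--         return True
--
--     # At least one positive tag must match (OR logic)
--     return bool(set(positive_tags) & active_tags)
-- ===== SOURCE B (Python) =====
-- def _tags_match(func_tags, active_tags):
--     """Single pass over func_tags with three flags; no partition lists, no set intersection."""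
--     if func_tags is None:
--         return True
--     negated_hit = False
--     saw_positive = False
--     positive_matched = False
--     for tag in func_tags:
--         if tag.startswith("!"):
--             negated_hit = negated_hit or tag[1:] in active_tags
--         else:
--             saw_positive = True
--             positive_matched = positive_matched or tag in active_tags
--     return not negated_hit and (not saw_positive or positive_matched)
-- ===== Notes on version B (the rewrite author's own statement) =====
-- stated objective: simpler
-- what changed: Replaces A's partition into two intermediate lists followed by a separate negated-tag scan and a set-intersection test with one pass over func_tags maintaining three booleans, combined in a single final expression.
import Mathlib
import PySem

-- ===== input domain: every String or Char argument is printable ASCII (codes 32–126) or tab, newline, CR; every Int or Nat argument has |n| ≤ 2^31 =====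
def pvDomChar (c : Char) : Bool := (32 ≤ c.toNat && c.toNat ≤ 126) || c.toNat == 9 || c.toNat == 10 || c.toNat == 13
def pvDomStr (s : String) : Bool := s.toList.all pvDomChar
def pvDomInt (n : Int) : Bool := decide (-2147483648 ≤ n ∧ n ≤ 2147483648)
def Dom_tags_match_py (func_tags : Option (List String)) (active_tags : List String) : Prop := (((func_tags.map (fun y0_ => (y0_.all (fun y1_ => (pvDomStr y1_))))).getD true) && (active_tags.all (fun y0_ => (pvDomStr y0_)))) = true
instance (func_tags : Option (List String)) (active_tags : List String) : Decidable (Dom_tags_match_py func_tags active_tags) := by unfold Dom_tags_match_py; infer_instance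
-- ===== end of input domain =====

-- B replaces A's two partition lists + separate negated scan + set intersection by one
-- three-flag pass over func_tags (objective: simpler); return values proved equal everywhere.

-- ===== PORT A =====
-- the `for tag in func_tags` partition loop
def tagsPartitionA (tags : List String) (acc : List String × List String) : List String × List String :=
  tags.foldl (fun acc tag =>
    if PySem.Str.startswith tag "!" then
      (acc.1, acc.2 ++ [PySem.Str.slice tag (some 1) none])
    else
      (acc.1 ++ [tag], acc.2)) acc

-- the `for neg_tag in negated_tags: if neg_tag in active_tags: return False` loop
def tagsNegLoopA (negated : List String) (active_tags : List String) : Bool :=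
  match negated with
  | [] => true
  | t :: ts => if PySem.Set.contains active_tags t then false else tagsNegLoopA ts active_tags

def tags_match_py (func_tags : Option (List String)) (active_tags : List String) : Bool :=
  match func_tags with
  | none => true
  | some tags =>
    let pn := tagsPartitionA tags ([], [])
    let positive_tags := pn.1
    let negated_tags := pn.2
    if tagsNegLoopA negated_tags active_tags = false then false
    else if positive_tags = [] then true
    else !(PySem.Set.inter (PySem.Set.ofList positive_tags) active_tags).isEmpty

-- ===== PORT B =====
-- state: (negated_hit, saw_positive, positive_matched)
def tagsFoldB (tags : List String) (st : Bool × Bool × Bool) (active_tags : List String) : Bool × Bool × Bool :=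
  tags.foldl (fun st tag =>
    if PySem.Str.startswith tag "!" then
      (st.1 || PySem.Set.contains active_tags (PySem.Str.slice tag (some 1) none), st.2.1, st.2.2)
    else
      (st.1, true, st.2.2 || PySem.Set.contains active_tags tag)) st

def tags_match_py_alt (func_tags : Option (List String)) (active_tags : List String) : Bool :=
  match func_tags with
  | none => true
  | some tags =>
    let st := tagsFoldB tags (false, false, false) active_tags
    !st.1 && (!st.2.1 || st.2.2)

-- ===== PRECONDITION & SPEC =====
def Spec_tags_match_py (func_tags : Option (List String)) (active_tags : List String) (out : Bool) : Prop := out = tags_match_py_alt func_tags active_tags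
instance (func_tags : Option (List String)) (active_tags : List String) (out : Bool) : Decidable (Spec_tags_match_py func_tags active_tags out) := by unfold Spec_tags_match_py; infer_instance

-- ===== CLAIM (what is proved, stated in full; the proofs are below) =====
def Claim_equal_tags_match_py : Prop := ∀ (func_tags : Option (List String)) (active_tags : List String), Dom_tags_match_py func_tags active_tags → Spec_tags_match_py func_tags active_tags (tags_match_py func_tags active_tags)

-- ===== LEMMAS AND PROOFS =====

-- predicates shared by both characterisations
def tagIsNeg (t : String) : Bool := PySem.Str.startswith t "!"
def tagTail (t : String) : String := PySem.Str.slice t (some 1) none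

lemma tagsPartitionA_eq (tags : List String) (acc : List String × List String) :
    tagsPartitionA tags acc =
      (acc.1 ++ (tags.filter (fun t => !tagIsNeg t)),
       acc.2 ++ (tags.filter tagIsNeg).map tagTail) := by
  induction tags generalizing acc with
  | nil => simp [tagsPartitionA]
  | cons t ts ih =>
    simp only [tagsPartitionA, List.foldl_cons] at *
    by_cases h : PySem.Str.startswith t "!"
    · rw [if_pos h, ih]
      have h' : PySem.Chars.startswith t.toList ['!'] = true := by simpa using h
      simp [tagIsNeg, tagTail, h']
    · rw [if_neg h, ih]
      have h' : PySem.Chars.startswith t.toList ['!'] = false := by simpa using h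
      simp [tagIsNeg, h']

lemma tagsNegLoopA_eq (negated active : List String) :
    tagsNegLoopA negated active = !negated.any (fun t => PySem.Set.contains active t) := by
  induction negated with
  | nil => simp [tagsNegLoopA]
  | cons t ts ih =>
    by_cases h : PySem.Set.contains active t <;> simp [tagsNegLoopA, ih]

lemma tagsFoldB_eq (tags : List String) (st : Bool × Bool × Bool) (active : List String) :
    tagsFoldB tags st active =
      (st.1 || tags.any (fun t => tagIsNeg t && PySem.Set.contains active (tagTail t)),
       st.2.1 || tags.any (fun t => !tagIsNeg t),
       st.2.2 || tags.any (fun t => !tagIsNeg t && PySem.Set.contains active t)) := by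
  induction tags generalizing st with
  | nil => simp [tagsFoldB]
  | cons t ts ih =>
    simp only [tagsFoldB, List.foldl_cons] at *
    by_cases h : PySem.Str.startswith t "!"
    · rw [if_pos h, ih]
      have h' : PySem.Chars.startswith t.toList ['!'] = true := by simpa using h
      simp [tagIsNeg, tagTail, h', Bool.or_assoc]
    · rw [if_neg h, ih]
      have h' : PySem.Chars.startswith t.toList ['!'] = false := by simpa using h
      simp [tagIsNeg, tagTail, h', Bool.or_assoc]

lemma inter_isEmpty_eq (pos active : List String) :
    (PySem.Set.inter (PySem.Set.ofList pos) active).isEmpty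
      = !pos.any (fun t => PySem.Set.contains active t) := by
  cases hb : pos.any (fun t => PySem.Set.contains active t) with
  | false =>
    simp only [Bool.not_false, PySem.Set.inter, List.isEmpty_iff, List.filter_eq_nil_iff]
    intro t ht
    have h2 := List.any_eq_false.mp hb t (by simpa [PySem.Set.mem_ofList] using ht)
    simpa using h2
  | true =>
    obtain ⟨t, ht, hc⟩ := List.any_eq_true.mp hb
    have hm : t ∈ PySem.Set.inter (PySem.Set.ofList pos) active := by
      simp only [PySem.Set.inter, List.mem_filter]
      exact ⟨by simpa [PySem.Set.mem_ofList] using ht, hc⟩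
    simp only [Bool.not_true]
    exact List.isEmpty_eq_false_iff_exists_mem.mpr ⟨t, hm⟩

-- ===== VERDICT (by name: the statement is the Claim_ definition above) =====
theorem tags_match_py_spec : Claim_equal_tags_match_py := by
  intro func_tags active_tags _
  unfold Spec_tags_match_py
  cases func_tags with
  | none => rfl
  | some tags =>
    simp only [tags_match_py, tags_match_py_alt, tagsPartitionA_eq, tagsFoldB_eq,
      tagsNegLoopA_eq, List.nil_append]
    have hnegF : ((tags.filter tagIsNeg).map tagTail).any (fun t => PySem.Set.contains active_tags t)
        = tags.any (fun t => tagIsNeg t && PySem.Set.contains active_tags (tagTail t)) := by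
      simp [List.any_map, List.any_filter, Function.comp_def]
    rw [hnegF, inter_isEmpty_eq, List.any_filter]
    simp only [Bool.not_not, Bool.false_or]
    cases hneg : tags.any (fun t => tagIsNeg t && PySem.Set.contains active_tags (tagTail t)) with
    | true => rfl
    | false =>
      simp only [Bool.not_false, Bool.true_and]
      rw [if_neg (by simp)]
      cases hsaw : tags.any (fun t => !tagIsNeg t) with
      | false =>
        have hnil : tags.filter (fun t => !tagIsNeg t) = [] := by
          rw [List.filter_eq_nil_iff]
          intro t ht
          simpa using List.any_eq_false.mp hsaw t ht
        rw [if_pos hnil]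
        simp
      | true =>
        have hne : ¬ tags.filter (fun t => !tagIsNeg t) = [] := by
          obtain ⟨t, ht, hp⟩ := List.any_eq_true.mp hsaw
          exact List.ne_nil_of_mem (List.mem_filter.mpr ⟨ht, hp⟩)
        rw [if_neg hne]
        simp
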